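-- pv_equiv track=rewrite | github.com/SatoMichi/Mahjong_in_Python | JudgeRon.py | sansets
-- ===== SOURCE A (Python) =====
-- def sansets(hand,openHand):
--     hand_no = pai2onlyno(hand)
--     openHand_no = pai2onlyno(openHand)
--     for i in range(7):
--         ron_judge = [[0+i,1+i,2+i],[9+i,10+i,11+i],[18+i,19+i,20+i]]
--         ron = [False,False,False]
--         for j,r in enumerate(ron_judge):
--             if(r in hand_no or r in openHand_no):
--                 ron[j] = True
--         if(not False in ron):
--             return True
--     return False
--
-- def pai2onlyno(hand):
--     honlyno = []
--     for h in hand: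
--         if(len(h)==4):
--             new_h = [h[0][0],h[1][0],h[2][0],h[3][0]]
--         elif(len(h)==3):
--             new_h = [h[0][0],h[1][0],h[2][0]]
--         elif(len(h)==2):
--             new_h = [h[0][0],h[1][0]]
--         else:
--             new_h = [h[0][0]]
--         honlyno.append(new_h)
--     return honlyno
-- ===== SOURCE B (Python) =====
-- def _triple_start(g):
--     # classify a group: return the start tile of a suit-internal consecutive
--     # triple (offset 0..6 within its 9-tile block), else None
--     if len(g) == 3:
--         n = g[0][0]
--         if g[1][0] == n + 1 and g[2][0] == n + 2 and 0 <= n < 27 and n % 9 <= 6: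
--             return n
--     return None
--
-- def sansets(hand, openHand):
--     # Invert A's candidate-scan: one pass classifies every group into a bucket
--     # per offset, collecting which suits appear there; then check the buckets.
--     suits = [set() for _ in range(7)]
--     for g in hand + openHand:
--         n = _triple_start(g)
--         if n is not None:
--             suits[n % 9].add(n // 9)
--     return any(len(s) == 3 for s in suits)
-- ===== Notes on version B (the rewrite author's own statement) =====
-- stated objective: alternative
-- what changed: A converts both hands and, for each of 7 offsets, scans the converted lists for three constructed candidate triples; B never constructs candidates: one pass classifies each group by the start tile of its consecutive triple into a per-offset bucket of suits, and the answer is whether some bucket holds all three suits.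
import Mathlib
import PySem

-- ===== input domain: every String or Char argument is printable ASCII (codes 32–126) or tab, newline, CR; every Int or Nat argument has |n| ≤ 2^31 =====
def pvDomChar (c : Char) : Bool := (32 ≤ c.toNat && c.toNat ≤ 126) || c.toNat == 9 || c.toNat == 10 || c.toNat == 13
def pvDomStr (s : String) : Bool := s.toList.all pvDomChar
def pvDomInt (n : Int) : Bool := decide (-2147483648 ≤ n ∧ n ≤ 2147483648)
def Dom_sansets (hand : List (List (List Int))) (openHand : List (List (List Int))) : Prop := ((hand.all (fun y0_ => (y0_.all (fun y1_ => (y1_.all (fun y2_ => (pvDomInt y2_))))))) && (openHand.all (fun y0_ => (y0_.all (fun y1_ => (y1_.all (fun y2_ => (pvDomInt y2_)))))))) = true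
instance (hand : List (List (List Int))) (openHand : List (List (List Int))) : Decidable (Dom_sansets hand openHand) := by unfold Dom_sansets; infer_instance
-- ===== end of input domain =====

-- B inverts A's candidate scan: instead of constructing 21 candidate triples and
-- scanning the converted hands for each, it classifies every group once into a
-- per-offset bucket of suits and checks the buckets. (Alternative; not claimed faster.)

-- ===== PORT A =====
-- h[j][0], total form; inside Pre_ every access is in range, so the defaults are never used
def pvFirst (h : List (List Int)) (j : Int) : Int :=
  ((PySem.List.pyGet? h j).getD []).headD 0

def pvNewH (h : List (List Int)) : List Int :=
  if h.length == 4 then [pvFirst h 0, pvFirst h 1, pvFirst h 2, pvFirst h 3]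
  else if h.length == 3 then [pvFirst h 0, pvFirst h 1, pvFirst h 2]
  else if h.length == 2 then [pvFirst h 0, pvFirst h 1]
  else [pvFirst h 0]

def pai2onlyno (hand : List (List (List Int))) : List (List Int) :=
  hand.foldl (fun acc h => acc ++ [pvNewH h]) []

def sansets (hand : List (List (List Int))) (openHand : List (List (List Int))) : Bool :=
  let hand_no := pai2onlyno hand
  let openHand_no := pai2onlyno openHand
  (PySem.List.pyRange 0 7 1).any (fun i =>
    let ron_judge := [[0+i,1+i,2+i],[9+i,10+i,11+i],[18+i,19+i,20+i]]
    let ron := ron_judge.map (fun r => hand_no.contains r || openHand_no.contains r)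
    !(ron.contains false))

-- ===== PORT B =====
-- _triple_start(g) from Source B
def tripleStart (g : List (List Int)) : Option Int :=
  if g.length == 3 then
    if pvFirst g 1 = pvFirst g 0 + 1 ∧ pvFirst g 2 = pvFirst g 0 + 2 ∧
        0 ≤ pvFirst g 0 ∧ pvFirst g 0 < 27 ∧ PySem.Int.mod (pvFirst g 0) 9 ≤ 6
    then some (pvFirst g 0) else none
  else none

-- loop body: suits[n % 9].add(n // 9) when _triple_start(g) is not None
def pvStep (su : List (PySem.Set Int)) (g : List (List Int)) : List (PySem.Set Int) :=
  match tripleStart g with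
  | some n =>
    PySem.List.pySetD su (PySem.Int.mod n 9)
      (PySem.Set.add (PySem.List.pyGetD su (PySem.Int.mod n 9) PySem.Set.empty)
        (PySem.Int.floordiv n 9))
  | none => su

def sansets_alt (hand : List (List (List Int))) (openHand : List (List (List Int))) : Bool :=
  let init : List (PySem.Set Int) := (PySem.List.pyRange 0 7 1).map (fun _ => PySem.Set.empty)
  let suits := (hand ++ openHand).foldl pvStep init
  suits.any (fun s => PySem.Set.len s == 3)

-- ===== PRECONDITION & SPEC =====
-- Pre_ excludes exactly the inputs where Python A raises IndexError in pai2onlyno: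
-- an empty group, or an empty tile list among the tiles A indexes (the first
-- min(len g, 4) tiles for len g ≤ 4, only the first tile otherwise).
def Pre_sansets (hand : List (List (List Int))) (openHand : List (List (List Int))) : Prop :=
  ∀ g ∈ hand ++ openHand, g ≠ [] ∧ ∀ t ∈ g.take (if g.length ≤ 4 then 4 else 1), t ≠ []
instance (hand : List (List (List Int))) (openHand : List (List (List Int))) : Decidable (Pre_sansets hand openHand) := by unfold Pre_sansets; infer_instance

def pvWitness_sansets : List (List (List Int)) × List (List (List Int)) :=
  ([[[1],[2],[3]], [[10],[11],[12]]], [[[19],[20],[21]]])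

def Spec_sansets (hand : List (List (List Int))) (openHand : List (List (List Int))) (out : Bool) : Prop := out = sansets_alt hand openHand
instance (hand : List (List (List Int))) (openHand : List (List (List Int))) (out : Bool) : Decidable (Spec_sansets hand openHand out) := by unfold Spec_sansets; infer_instance

-- ===== CLAIM (what is proved, stated in full; the proofs are below) =====
def Claim_equal_sansets : Prop := ∀ (hand : List (List (List Int))) (openHand : List (List (List Int))), Dom_sansets hand openHand → Pre_sansets hand openHand → Spec_sansets hand openHand (sansets hand openHand)

-- ===== LEMMAS AND PROOFS =====

lemma pai2onlyno_eq_map (hand : List (List (List Int))) :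
    pai2onlyno hand = hand.map pvNewH := by
  unfold pai2onlyno
  simpa using PySem.List.foldl_append_singleton_eq_map pvNewH hand []

-- A's converted group equals a consecutive triple iff the group has 3 tiles with those firsts
lemma newH_eq_triple (g : List (List Int)) (r : Int) :
    pvNewH g = [r, r+1, r+2] ↔
      g.length = 3 ∧ pvFirst g 0 = r ∧ pvFirst g 1 = r + 1 ∧ pvFirst g 2 = r + 2 := by
  unfold pvNewH
  split_ifs with h1 h2 h3 <;> simp_all

lemma tripleStart_bounds {g : List (List Int)} {n : Int} (h : tripleStart g = some n) :
    0 ≤ n ∧ n < 27 ∧ PySem.Int.mod n 9 ≤ 6 := by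
  unfold tripleStart at h
  split_ifs at h with h1 h2
  · injection h with e
    subst e
    exact ⟨h2.2.2.1, h2.2.2.2.1, h2.2.2.2.2⟩

lemma tripleStart_some_iff (g : List (List Int)) (m : Int)
    (h0 : 0 ≤ m) (h27 : m < 27) (hm : PySem.Int.mod m 9 ≤ 6) :
    tripleStart g = some m ↔ pvNewH g = [m, m+1, m+2] := by
  constructor
  · intro h
    obtain ⟨hl, e0, e1, e2⟩ : g.length = 3 ∧ pvFirst g 0 = m ∧
        pvFirst g 1 = m + 1 ∧ pvFirst g 2 = m + 2 := by
      unfold tripleStart at h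
      split_ifs at h with h1 h2
      · injection h with e
        exact ⟨by simpa using h1, e, by omega, by omega⟩
    rw [newH_eq_triple]
    exact ⟨hl, e0, e1, e2⟩
  · intro h
    rw [newH_eq_triple] at h
    obtain ⟨hl, e0, e1, e2⟩ := h
    unfold tripleStart
    rw [if_pos (by simpa using hl),
      if_pos ⟨by omega, by omega, by omega, by omega, by rw [e0]; exact hm⟩, e0]

lemma step_length (su : List (PySem.Set Int)) (g : List (List Int)) :
    (pvStep su g).length = su.length := by
  unfold pvStep
  cases h : tripleStart g with
  | none => rfl
  | some n => rw [PySem.List.length_pySetD]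

lemma fold_length (l : List (List (List Int))) (su : List (PySem.Set Int)) :
    (l.foldl pvStep su).length = su.length := by
  induction l generalizing su with
  | nil => rfl
  | cons g gs ih => rw [List.foldl_cons, ih, step_length]

-- membership in bucket i after the fold
set_option maxHeartbeats 1000000 in
lemma fold_mem (l : List (List (List Int))) (su : List (PySem.Set Int))
    (hlen : su.length = 7) (i : Int) (hi0 : 0 ≤ i) (hi7 : i < 7) (s : Int) :
    s ∈ PySem.List.pyGetD (l.foldl pvStep su) i PySem.Set.empty ↔
      s ∈ PySem.List.pyGetD su i PySem.Set.empty ∨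
        ∃ g ∈ l, ∃ n, tripleStart g = some n ∧ PySem.Int.mod n 9 = i ∧
          PySem.Int.floordiv n 9 = s := by
  induction l generalizing su with
  | nil => simp
  | cons g gs ih =>
    rw [List.foldl_cons, List.exists_mem_cons_iff]
    have hstep_len : (pvStep su g).length = 7 := by rw [step_length]; exact hlen
    rw [ih _ hstep_len]
    cases h : tripleStart g with
    | none =>
      have hpv : pvStep su g = su := by unfold pvStep; rw [h]
      rw [hpv]
      have hP : ¬ ∃ n, (none : Option Int) = some n ∧ PySem.Int.mod n 9 = i ∧
          PySem.Int.floordiv n 9 = s := by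
        rintro ⟨n, hn, -⟩; cases hn
      tauto
    | some n =>
      obtain ⟨hn0, hn27, hnm⟩ := tripleStart_bounds h
      have hm0 : 0 ≤ PySem.Int.mod n 9 := PySem.Int.mod_nonneg n (by norm_num)
      have hk : PySem.Int.mod n 9 = ((PySem.Int.mod n 9).toNat : Int) := by omega
      have hhead : (∃ n', (some n : Option Int) = some n' ∧ PySem.Int.mod n' 9 = i ∧
          PySem.Int.floordiv n' 9 = s) ↔
          (i = ((PySem.Int.mod n 9).toNat : Int) ∧ s = PySem.Int.floordiv n 9) := by
        constructor
        · rintro ⟨n', hn', hmm, hd⟩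
          injection hn' with e
          subst e
          exact ⟨by omega, hd.symm⟩
        · rintro ⟨e1, e2⟩
          exact ⟨n, rfl, by omega, e2.symm⟩
      rw [hhead]
      have hpv : pvStep su g = PySem.List.pySetD su (PySem.Int.mod n 9)
          (PySem.Set.add (PySem.List.pyGetD su (PySem.Int.mod n 9) PySem.Set.empty)
            (PySem.Int.floordiv n 9)) := by
        unfold pvStep; rw [h]
      rw [hpv, hk]
      have hicast : i = ((i.toNat : Nat) : Int) := by omega
      rw [hicast, PySem.List.pyGetD_pySetD_natCast su _ _ _ _ (by omega)]
      by_cases hie : i.toNat = (PySem.Int.mod n 9).toNat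
      · rw [if_pos hie, PySem.Set.mem_add, hie]
        have htr : (((PySem.Int.mod n 9).toNat : Nat) : Int) =
            (((PySem.Int.mod n 9).toNat : Nat) : Int) := rfl
        tauto
      · rw [if_neg hie]
        have hne : ¬ (((i.toNat : Nat) : Int) = ((PySem.Int.mod n 9).toNat : Int) ∧
            s = PySem.Int.floordiv n 9) := by
          rintro ⟨e, -⟩
          exact hie (by exact_mod_cast e)
        tauto

-- every bucket stays Nodup with members in [0, 3)
lemma fold_inv (l : List (List (List Int))) (su : List (PySem.Set Int))
    (hlen : su.length = 7)
    (h : ∀ i : Int, 0 ≤ i → i < 7 →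
      (PySem.List.pyGetD su i PySem.Set.empty).Nodup ∧
      ∀ s ∈ PySem.List.pyGetD su i PySem.Set.empty, 0 ≤ s ∧ s < 3) :
    ∀ i : Int, 0 ≤ i → i < 7 →
      (PySem.List.pyGetD (l.foldl pvStep su) i PySem.Set.empty).Nodup ∧
      ∀ s ∈ PySem.List.pyGetD (l.foldl pvStep su) i PySem.Set.empty, 0 ≤ s ∧ s < 3 := by
  induction l generalizing su with
  | nil => exact h
  | cons g gs ih =>
    rw [List.foldl_cons]
    refine ih _ (by rw [step_length]; exact hlen) ?_
    cases hts : tripleStart g with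
    | none =>
      have hpv : pvStep su g = su := by unfold pvStep; rw [hts]
      rw [hpv]; exact h
    | some n =>
      obtain ⟨hn0, hn27, hnm⟩ := tripleStart_bounds hts
      have hm0 : 0 ≤ PySem.Int.mod n 9 := PySem.Int.mod_nonneg n (by norm_num)
      have hk : PySem.Int.mod n 9 = ((PySem.Int.mod n 9).toNat : Int) := by omega
      have hpv : pvStep su g = PySem.List.pySetD su (PySem.Int.mod n 9)
          (PySem.Set.add (PySem.List.pyGetD su (PySem.Int.mod n 9) PySem.Set.empty)
            (PySem.Int.floordiv n 9)) := by
        unfold pvStep; rw [hts]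
      rw [hpv, hk]
      intro i hi0 hi7
      have hicast : i = ((i.toNat : Nat) : Int) := by omega
      rw [hicast, PySem.List.pyGetD_pySetD_natCast su _ _ _ _ (by omega)]
      by_cases hie : i.toNat = (PySem.Int.mod n 9).toNat
      · rw [if_pos hie]
        have hold := h (PySem.Int.mod n 9) hm0 (by omega)
        rw [hk] at hold
        have hdivr : 0 ≤ PySem.Int.floordiv n 9 ∧ PySem.Int.floordiv n 9 < 3 := by
          rw [PySem.Int.floordiv_eq_ediv_of_pos (by norm_num : (0:Int) < 9)]
          omega
        refine ⟨PySem.Set.nodup_add _ _ hold.1, ?_⟩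
        intro s hs
        rw [PySem.Set.mem_add] at hs
        rcases hs with hs | rfl
        · exact hold.2 s hs
        · exact hdivr
      · rw [if_neg hie, ← hicast]
        exact h i hi0 hi7

-- a Nodup list of ints in [0,3) has length 3 iff it contains 0, 1 and 2
lemma len3_iff (v : List Int) (hn : v.Nodup) (hsub : ∀ s ∈ v, 0 ≤ s ∧ s < 3) :
    v.length = 3 ↔ (0 ∈ v ∧ 1 ∈ v ∧ 2 ∈ v) := by
  have hsubT : v.toFinset ⊆ ({0, 1, 2} : Finset Int) := by
    intro x hx
    have := hsub x (List.mem_toFinset.mp hx)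
    simp only [Finset.mem_insert, Finset.mem_singleton]
    omega
  have hcardT : ({0, 1, 2} : Finset Int).card = 3 := by decide
  have hcard : v.toFinset.card = v.length := List.toFinset_card_of_nodup hn
  constructor
  · intro hlen
    have heq : v.toFinset = ({0, 1, 2} : Finset Int) :=
      Finset.eq_of_subset_of_card_le hsubT (by omega)
    refine ⟨?_, ?_, ?_⟩ <;>
      · rw [← List.mem_toFinset, heq]; decide
  · rintro ⟨h0, h1, h2⟩
    have hsup : ({0, 1, 2} : Finset Int) ⊆ v.toFinset := by
      intro x hx
      simp only [Finset.mem_insert, Finset.mem_singleton] at hx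
      rcases hx with rfl | rfl | rfl <;> exact List.mem_toFinset.mpr (by assumption)
    have h3le := Finset.card_le_card hsup
    have hle3 := Finset.card_le_card hsubT
    omega

-- Python's  not False in [a, b, c]
lemma bang_contains (a b c : Bool) : (!([a, b, c].contains false)) = (a && (b && c)) := by
  cases a <;> cases b <;> cases c <;> rfl

-- characterisation of A
lemma A_iff (hand openHand : List (List (List Int))) :
    sansets hand openHand = true ↔
      ∃ i ∈ PySem.List.pyRange 0 7 1,
        [0+i,1+i,2+i] ∈ (hand ++ openHand).map pvNewH ∧
        [9+i,10+i,11+i] ∈ (hand ++ openHand).map pvNewH ∧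
        [18+i,19+i,20+i] ∈ (hand ++ openHand).map pvNewH := by
  unfold sansets
  rw [List.any_eq_true]
  refine exists_congr fun i => and_congr_right fun _ => ?_
  simp only [pai2onlyno_eq_map, List.map_cons, List.map_nil]
  rw [bang_contains]
  simp [List.map_append]

-- characterisation of B: same right-hand side as A_iff
lemma B_iff (hand openHand : List (List (List Int))) :
    sansets_alt hand openHand = true ↔
      ∃ i ∈ PySem.List.pyRange 0 7 1,
        [0+i,1+i,2+i] ∈ (hand ++ openHand).map pvNewH ∧
        [9+i,10+i,11+i] ∈ (hand ++ openHand).map pvNewH ∧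
        [18+i,19+i,20+i] ∈ (hand ++ openHand).map pvNewH := by
  unfold sansets_alt
  simp only
  have hr7 : PySem.List.pyRange 0 7 1 = [0, 1, 2, 3, 4, 5, 6] := by decide
  set init : List (PySem.Set Int) := (PySem.List.pyRange 0 7 1).map (fun _ => PySem.Set.empty) with hinit
  have hinitlen : init.length = 7 := by rw [hinit, hr7]; rfl
  have hinitget : ∀ i : Int, PySem.List.pyGetD init i PySem.Set.empty = PySem.Set.empty := by
    intro i
    rw [hinit, hr7]
    simp only [List.map_cons, List.map_nil]
    unfold PySem.List.pyGetD
    cases h : PySem.List.pyGet? ([PySem.Set.empty, PySem.Set.empty, PySem.Set.empty,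
      PySem.Set.empty, PySem.Set.empty, PySem.Set.empty, PySem.Set.empty] :
        List (PySem.Set Int)) i with
    | none => rfl
    | some v =>
      have hmem := PySem.List.mem_of_pyGet?_eq_some _ h
      simp only [List.mem_cons, List.not_mem_nil, or_false] at hmem
      simp only [Option.getD_some]
      rcases hmem with rfl | rfl | rfl | rfl | rfl | rfl | rfl <;> rfl
  set suits := (hand ++ openHand).foldl pvStep init with hsuits
  have hslen : suits.length = 7 := by rw [hsuits, fold_length, hinitlen]
  -- bucket membership in terms of converted triples
  have hbucket : ∀ i : Int, 0 ≤ i → i < 7 → ∀ s : Int, 0 ≤ s → s < 3 →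
      (s ∈ PySem.List.pyGetD suits i PySem.Set.empty ↔
        [9*s+i, 9*s+i+1, 9*s+i+2] ∈ (hand ++ openHand).map pvNewH) := by
    intro i hi0 hi7 s hs0 hs3
    rw [hsuits, fold_mem _ _ hinitlen i hi0 hi7, hinitget]
    simp only [PySem.Set.empty, List.not_mem_nil, false_or, List.mem_map]
    constructor
    · rintro ⟨g, hg, n, hn, hmod, hdiv⟩
      obtain ⟨hn0, hn27, hnm⟩ := tripleStart_bounds hn
      have hne : n = 9*s + i := by
        have := PySem.Int.floordiv_mul_add_mod n 9
        rw [hmod, hdiv] at this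
        omega
      subst hne
      refine ⟨g, hg, ?_⟩
      rw [← tripleStart_some_iff g _ (by omega) (by omega) (by omega)]
      exact hn
    · rintro ⟨g, hg, hgt⟩
      have hmod9 : PySem.Int.mod (9*s+i) 9 = i := by
        rw [PySem.Int.mod_eq_emod_of_pos (by norm_num : (0:Int) < 9)]
        omega
      have hdiv9 : PySem.Int.floordiv (9*s+i) 9 = s := by
        rw [PySem.Int.floordiv_eq_ediv_of_pos (by norm_num : (0:Int) < 9)]
        omega
      refine ⟨g, hg, 9*s+i, ?_, hmod9, hdiv9⟩
      rw [tripleStart_some_iff g _ (by omega) (by omega) (by rw [hmod9]; omega)]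
      exact hgt
  have hinv := fold_inv (hand ++ openHand) init hinitlen (by
    intro i _ _
    rw [hinitget]
    exact ⟨List.nodup_nil, by simp [PySem.Set.empty]⟩)
  rw [← hsuits] at hinv
  rw [List.any_eq_true]
  constructor
  · rintro ⟨v, hv, hlen3⟩
    obtain ⟨j, hj, hvj⟩ := List.mem_iff_getElem.mp hv
    have hj7 : j < 7 := by omega
    have hvget : v = PySem.List.pyGetD suits ((j : Nat) : Int) PySem.Set.empty := by
      rw [PySem.List.pyGetD_natCast, List.getD_eq_getElem _ _ (by omega), hvj]
    have hinvj := hinv ((j : Nat) : Int) (by omega) (by exact_mod_cast hj7)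
    rw [← hvget] at hinvj
    have hl3 : v.length = 3 := by
      have hl : PySem.Set.len v = 3 := by simpa using hlen3
      simp only [PySem.Set.len] at hl
      omega
    rw [len3_iff v hinvj.1 hinvj.2] at hl3
    obtain ⟨m0, m1, m2⟩ := hl3
    rw [hvget] at m0 m1 m2
    refine ⟨((j : Nat) : Int), by rw [PySem.List.mem_pyRange_one]; omega, ?_, ?_, ?_⟩
    · have := (hbucket _ (by omega) (by exact_mod_cast hj7) 0 (by omega) (by omega)).mp m0
      rw [show [0+((j:Nat):Int), 1+((j:Nat):Int), 2+((j:Nat):Int)]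
          = [9*0+((j:Nat):Int), 9*0+((j:Nat):Int)+1, 9*0+((j:Nat):Int)+2] from by simp only [List.cons.injEq, and_true]; omega]
      exact this
    · have := (hbucket _ (by omega) (by exact_mod_cast hj7) 1 (by omega) (by omega)).mp m1
      rw [show [9+((j:Nat):Int), 10+((j:Nat):Int), 11+((j:Nat):Int)]
          = [9*1+((j:Nat):Int), 9*1+((j:Nat):Int)+1, 9*1+((j:Nat):Int)+2] from by simp only [List.cons.injEq, and_true]; omega]
      exact this
    · have := (hbucket _ (by omega) (by exact_mod_cast hj7) 2 (by omega) (by omega)).mp m2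
      rw [show [18+((j:Nat):Int), 19+((j:Nat):Int), 20+((j:Nat):Int)]
          = [9*2+((j:Nat):Int), 9*2+((j:Nat):Int)+1, 9*2+((j:Nat):Int)+2] from by simp only [List.cons.injEq, and_true]; omega]
      exact this
  · rintro ⟨i, hi, m0, m1, m2⟩
    rw [PySem.List.mem_pyRange_one] at hi
    have hm0 : [9*0+i, 9*0+i+1, 9*0+i+2] ∈ (hand ++ openHand).map pvNewH := by
      rw [show [9*0+i, 9*0+i+1, 9*0+i+2] = [0+i,1+i,2+i] from by simp only [List.cons.injEq, and_true]; omega]; exact m0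
    have hm1 : [9*1+i, 9*1+i+1, 9*1+i+2] ∈ (hand ++ openHand).map pvNewH := by
      rw [show [9*1+i, 9*1+i+1, 9*1+i+2] = [9+i,10+i,11+i] from by simp only [List.cons.injEq, and_true]; omega]; exact m1
    have hm2 : [9*2+i, 9*2+i+1, 9*2+i+2] ∈ (hand ++ openHand).map pvNewH := by
      rw [show [9*2+i, 9*2+i+1, 9*2+i+2] = [18+i,19+i,20+i] from by simp only [List.cons.injEq, and_true]; omega]; exact m2
    set v := PySem.List.pyGetD suits i PySem.Set.empty with hv
    have hb0 := (hbucket i hi.1 hi.2 0 (by omega) (by omega)).mpr hm0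
    have hb1 := (hbucket i hi.1 hi.2 1 (by omega) (by omega)).mpr hm1
    have hb2 := (hbucket i hi.1 hi.2 2 (by omega) (by omega)).mpr hm2
    have hinvi := hinv i hi.1 hi.2
    have hl3 : v.length = 3 := (len3_iff v hinvi.1 hinvi.2).mpr ⟨hb0, hb1, hb2⟩
    refine ⟨v, ?_, ?_⟩
    · have hvj : v = suits.getD i.toNat PySem.Set.empty := by
        rw [hv, show i = ((i.toNat : Nat) : Int) from by omega, PySem.List.pyGetD_natCast]
        simp only [List.getD_eq_getElem?_getD]
        rw [show ((i.toNat : Int)).toNat = i.toNat from by omega]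
      rw [hvj, List.getD_eq_getElem _ _ (by omega)]
      exact List.getElem_mem _
    · simp [PySem.Set.len, hl3]

-- ===== VERDICT (by name: the statement is the Claim_ definition above) =====
theorem sansets_spec : Claim_equal_sansets := by
  intro hand openHand _ _
  unfold Spec_sansets
  rw [Bool.eq_iff_iff, A_iff, B_iff]
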